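-- pv_equiv track=rewrite | github.com/WhimsicalDragon/BraidMaker | Braid.py | leftOver
-- ===== SOURCE A (Python) =====
-- def noCross(visual):
--     #The last elem should always have no crossings as it is the start of the braid
--     visual.insert(0,visual[-1])
--     return visual
--
-- def leftOver(visual,overStrand,size):
--     if overStrand == 0:
--         raise Exception("There is an issue with the braid word given. Braid word asks to cross leftmost strand over another strand in the left direction. This cannot happen!")
--     line = []
--
--     for i in range(size-1):
--         if i != overStrand:
--             line.append('|')
--             line.append(' ')
--         else:
--             del line[-1]
--             del line[-1]
--             line.append('/')
--             line.append('-')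
--             line.append('\\')
--             line.append(' ')
--
--     del line[-1]
--     visual.insert(0,line)
--
--     visual = noCross(visual)
--     return visual
-- ===== SOURCE B (Python) =====
-- def leftOver(visual, overStrand, size):
--     # Same mutation of `visual` (two inserts at the front) as the original.
--     if overStrand == 0:
--         raise Exception("There is an issue with the braid word given. Braid word asks to cross leftmost strand over another strand in the left direction. This cannot happen!")
--     if 1 <= overStrand <= size - 2:
--         line = ['|', ' '] * (overStrand - 1) + ['/', '-', '\\', ' '] + ['|', ' '] * (size - 2 - overStrand)
--     else:
--         line = ['|', ' '] * (size - 1)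
--     del line[-1]
--     visual.insert(0, line)
--     visual.insert(0, visual[-1])
--     return visual
-- ===== Notes on version B (the rewrite author's own statement) =====
-- stated objective: simpler
-- what changed: The element-by-element loop with mid-loop deletions is replaced by a direct closed-form construction of the line: ['|',' ']*(overStrand-1) + ['/','-','\\',' '] + ['|',' ']*(size-2-overStrand) when 1 <= overStrand <= size-2, else ['|',' ']*(size-1), then drop the trailing element; the two front inserts into visual are unchanged.
import Mathlib
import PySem

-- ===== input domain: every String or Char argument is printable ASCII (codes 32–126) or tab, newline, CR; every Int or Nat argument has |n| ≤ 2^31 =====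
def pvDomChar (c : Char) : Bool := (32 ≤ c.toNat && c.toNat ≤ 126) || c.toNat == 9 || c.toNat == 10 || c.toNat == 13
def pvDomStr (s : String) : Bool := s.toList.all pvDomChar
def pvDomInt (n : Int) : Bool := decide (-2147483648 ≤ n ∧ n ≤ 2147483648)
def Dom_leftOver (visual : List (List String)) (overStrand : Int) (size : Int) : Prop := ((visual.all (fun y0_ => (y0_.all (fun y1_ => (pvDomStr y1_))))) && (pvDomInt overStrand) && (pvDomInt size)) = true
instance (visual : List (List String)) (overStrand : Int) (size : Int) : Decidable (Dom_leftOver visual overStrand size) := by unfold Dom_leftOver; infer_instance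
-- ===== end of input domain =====

-- B builds the crossing line by a closed-form concatenation instead of A's loop with
-- mid-loop deletions (objective: simpler). Both Pythons mutate `visual` in place the
-- same way (two front inserts); the equivalence proved here is about the return value.


-- ===== PORT A =====
-- visual.insert(0, visual[-1]); on [] Python would raise, but it is always called on a
-- non-empty list here (a line was just prepended), so the `none` branch is unreachable.
def noCross (visual : List (List String)) : List (List String) :=
  match PySem.List.pyGet? visual (-1) with
  | some last => last :: visual
  | none => visual

-- One loop iteration of A: append '|',' ' or delete the last two and append '/','-','\',' '.
def leftOverStep (overStrand : Int) (line : List String) (i : Int) : List String :=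
  if i ≠ overStrand then line ++ ["|", " "]
  else line.dropLast.dropLast ++ ["/", "-", "\\", " "]

def leftOver (visual : List (List String)) (overStrand : Int) (size : Int) : List (List String) :=
  let line := (PySem.List.pyRange 0 (size - 1) 1).foldl (leftOverStep overStrand) []
  let line := line.dropLast   -- del line[-1] (size ≤ 1, where Python raises, is outside Pre_)
  noCross (line :: visual)

-- ===== PORT B =====
-- ['|',' '] * n
def repPair (n : Int) : List String := List.flatten (List.replicate n.toNat ["|", " "])

def leftOver_alt (visual : List (List String)) (overStrand : Int) (size : Int) : List (List String) :=
  let line :=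
    if 1 ≤ overStrand ∧ overStrand ≤ size - 2 then
      repPair (overStrand - 1) ++ ["/", "-", "\\", " "] ++ repPair (size - 2 - overStrand)
    else
      repPair (size - 1)
  let line := line.dropLast   -- del line[-1]
  let visual := line :: visual
  -- visual.insert(0, visual[-1])
  match PySem.List.pyGet? visual (-1) with
  | some last => last :: visual
  | none => visual

-- ===== PRECONDITION & SPEC =====
-- Pre_ excludes exactly where Python A raises: overStrand == 0 (explicit Exception) and
-- size ≤ 1 (the final `del line[-1]` on an empty line raises IndexError).
def Pre_leftOver (visual : List (List String)) (overStrand : Int) (size : Int) : Prop :=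
  overStrand ≠ 0 ∧ 2 ≤ size
instance (visual : List (List String)) (overStrand : Int) (size : Int) : Decidable (Pre_leftOver visual overStrand size) := by unfold Pre_leftOver; infer_instance

def pvWitness_leftOver : List (List String) × Int × Int := ([["x"]], 1, 4)

def Spec_leftOver (visual : List (List String)) (overStrand : Int) (size : Int) (out : List (List String)) : Prop := out = leftOver_alt visual overStrand size
instance (visual : List (List String)) (overStrand : Int) (size : Int) (out : List (List String)) : Decidable (Spec_leftOver visual overStrand size out) := by unfold Spec_leftOver; infer_instance

-- ===== CLAIM (what is proved, stated in full; the proofs are below) =====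
def Claim_equal_leftOver : Prop := ∀ (visual : List (List String)) (overStrand : Int) (size : Int), Dom_leftOver visual overStrand size → Pre_leftOver visual overStrand size → Spec_leftOver visual overStrand size (leftOver visual overStrand size)

-- ===== LEMMAS AND PROOFS =====

theorem repPair_succ (k : Nat) : repPair ((k : Int) + 1) = repPair k ++ ["|", " "] := by
  simp [repPair, List.replicate_succ']

theorem repPair_dropLast2 (k : Nat) :
    (repPair ((k : Int) + 1)).dropLast.dropLast = repPair k := by
  rw [repPair_succ]
  rw [show repPair (k : Int) ++ ["|", " "] = (repPair (k : Int) ++ ["|"]) ++ [" "] by simp]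
  rw [List.dropLast_concat, List.dropLast_concat]

-- Loop invariant: after the loop over range(n), the line is the closed form.
theorem loop_closed (o : Int) (ho : o ≠ 0) (n : Nat) :
    (PySem.List.pyRange 0 (n : Int) 1).foldl (leftOverStep o) [] =
      if 1 ≤ o ∧ o ≤ (n : Int) - 1 then
        repPair (o - 1) ++ ["/", "-", "\\", " "] ++ repPair ((n : Int) - 1 - o)
      else repPair n := by
  induction n with
  | zero =>
    rw [PySem.List.pyRange_one_eq_nil (by norm_num)]
    simp [repPair]
    omega
  | succ m ih =>
    rw [show ((m + 1 : Nat) : Int) = (m : Int) + 1 by push_cast; ring,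
        PySem.List.pyRange_one_succ_right (by positivity), List.foldl_append, ih]
    by_cases h1 : 1 ≤ o ∧ o ≤ (m : Int) - 1
    · -- crossing already placed; this step appends a pair
      rw [if_pos h1, if_pos ⟨h1.1, by omega⟩]
      simp only [List.foldl_cons, List.foldl_nil, leftOverStep, if_pos (by omega : (m : Int) ≠ o)]
      have : (m : Int) - 1 - o = ((((m : Int) - 1 - o).toNat : Int)) := by omega
      rw [this, show ((m:Int) + 1 - 1 - o) = (((m : Int) - 1 - o).toNat : Int) + 1 by omega,
          repPair_succ]
      simp
    · rw [if_neg h1]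
      by_cases h2 : (m : Int) = o
      · -- this step places the crossing
        have hm1 : 1 ≤ m := by omega
        rw [if_pos (by omega)]
        simp only [List.foldl_cons, List.foldl_nil, leftOverStep, if_neg (by omega : ¬ (m : Int) ≠ o)]
        rw [show ((m : Int) + 1 - 1 - o) = ((0 : Nat) : Int) by omega,
            show o - 1 = (((m - 1 : Nat) : Int)) by omega,
            show repPair (m : Int) = repPair (((m - 1 : Nat) : Int) + 1) by congr 1; omega,
            repPair_dropLast2]
        simp [repPair]
      · -- still no crossing
        rw [if_neg (by omega)]
        simp only [List.foldl_cons, List.foldl_nil, leftOverStep, if_pos (by omega : (m : Int) ≠ o)]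
        rw [show repPair (m : Int) = repPair ((m : Nat) : Int) by norm_num, repPair_succ]

-- ===== VERDICT (by name: the statement is the Claim_ definition above) =====
theorem leftOver_spec : Claim_equal_leftOver := by
  intro visual o size _hdom hpre
  obtain ⟨ho, hs⟩ := hpre
  unfold Spec_leftOver leftOver leftOver_alt noCross
  have hn : size - 1 = (((size - 1).toNat : Int)) := by omega
  rw [hn, loop_closed o ho]
  by_cases h1 : 1 ≤ o ∧ o ≤ (((size - 1).toNat : Int)) - 1
  · rw [if_pos h1, if_pos (by constructor <;> omega)]
    have : (((size - 1).toNat : Int)) - 1 - o = size - 2 - o := by omega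
    rw [this]
  · rw [if_neg h1, if_neg (by omega)]
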